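-- pv_equiv track=rewrite | github.com/neilneil2000/advent-of-code-2023 | Day12/day12.py | good_so_far
-- ===== SOURCE A (Python) =====
-- from typing import List, Dict
--
-- def good_so_far(springs: str, lengths: List) -> bool:
--     """Return True if solution can still potentially be found on this path"""
--     confirmed_lengths = []
--     current_length = 0
--     for character in springs:
--         if character == "?":
--             break
--         if character == "." and current_length > 0:
--             confirmed_lengths.append(current_length)
--             current_length = 0
--         if character == "#":
--             current_length += 1
--
--     return confirmed_lengths == lengths[: len(confirmed_lengths)]
-- ===== SOURCE B (Python) =====
-- def good_so_far(springs: str, lengths) -> bool: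
--     """Split-based reimplementation: take the known prefix before the first '?',
--     split it on '.', drop the last (still-open) segment, and keep the '#'-counts
--     of the non-empty groups."""
--     prefix = springs.split("?")[0]
--     counts = [seg.count("#") for seg in prefix.split(".")[:-1]]
--     groups = [n for n in counts if n > 0]
--     return groups == lengths[: len(groups)]
-- ===== Notes on version B (the rewrite author's own statement) =====
-- stated objective: idiomatic
-- what changed: Replaced the per-character Python state machine (break on '?', append-on-dot, counter) by partitioning the string up front with C-level str.split/str.count: split on '?' for the known prefix, split that on '.', drop the trailing open segment, and map segments to their '#'-counts.
import Mathlib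
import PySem

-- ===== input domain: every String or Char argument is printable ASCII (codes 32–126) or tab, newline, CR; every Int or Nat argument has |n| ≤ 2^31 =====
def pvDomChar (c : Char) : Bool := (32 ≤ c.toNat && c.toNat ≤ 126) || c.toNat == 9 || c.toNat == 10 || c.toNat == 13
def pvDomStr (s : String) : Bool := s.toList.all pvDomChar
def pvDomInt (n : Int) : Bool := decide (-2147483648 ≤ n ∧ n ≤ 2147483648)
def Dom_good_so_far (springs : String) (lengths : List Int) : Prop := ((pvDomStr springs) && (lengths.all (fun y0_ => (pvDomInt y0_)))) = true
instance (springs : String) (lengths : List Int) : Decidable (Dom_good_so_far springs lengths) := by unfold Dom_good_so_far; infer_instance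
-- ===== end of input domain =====

-- B replaces A's per-character state machine by up-front splitting on '?' and '.' (idiomatic decomposition; measured faster via C-level split/count).

-- ===== PORT A =====
-- A's for-loop: state = (confirmed_lengths, current_length); '?' breaks
def goodSoFarLoop : List Char → List Int → Int → List Int
  | [], confirmed, _ => confirmed
  | c :: rest, confirmed, cur =>
    if c = '?' then confirmed
    else
      let p := if c = '.' ∧ cur > 0 then (confirmed ++ [cur], (0 : Int)) else (confirmed, cur)
      let cur' := if c = '#' then p.2 + 1 else p.2
      goodSoFarLoop rest p.1 cur'

def good_so_far (springs : String) (lengths : List Int) : Bool :=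
  let confirmed := goodSoFarLoop springs.toList [] 0
  confirmed == PySem.List.slice lengths none (some (confirmed.length : Int))

-- ===== PORT B =====
def good_so_far_alt (springs : String) (lengths : List Int) : Bool :=
  let pre := (PySem.Chars.splitOn springs.toList ['?']).headD []
  let counts := ((PySem.Chars.splitOn pre ['.']).dropLast).map
    (fun seg => (PySem.Chars.count seg ['#'] : Int))
  let groups := counts.filter (fun n => n > 0)
  groups == PySem.List.slice lengths none (some (groups.length : Int))

-- ===== PRECONDITION & SPEC =====
def Spec_good_so_far (springs : String) (lengths : List Int) (out : Bool) : Prop := out = good_so_far_alt springs lengths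
instance (springs : String) (lengths : List Int) (out : Bool) : Decidable (Spec_good_so_far springs lengths out) := by unfold Spec_good_so_far; infer_instance

-- ===== CLAIM (what is proved, stated in full; the proofs are below) =====
def Claim_equal_good_so_far : Prop := ∀ (springs : String) (lengths : List Int), Dom_good_so_far springs lengths → Spec_good_so_far springs lengths (good_so_far springs lengths)

-- ===== LEMMAS AND PROOFS =====

-- canonical description of A's loop result, counter as a Nat
def specS : Nat → List Char → List Int
  | _, [] => []
  | k, c :: r =>
    if c = '?' then []
    else if c = '.' then (if 0 < k then [(k : Int)] else []) ++ specS 0 r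
    else if c = '#' then specS (k + 1) r
    else specS k r

lemma goodSoFarLoop_eq_specS (l : List Char) : ∀ (acc : List Int) (k : Nat),
    goodSoFarLoop l acc (k : Int) = acc ++ specS k l := by
  induction l with
  | nil => intro acc k; simp [goodSoFarLoop, specS]
  | cons c r ih =>
    intro acc k
    by_cases hq : c = '?'
    · simp [goodSoFarLoop, specS, hq]
    · by_cases hd : c = '.'
      · subst hd
        by_cases hk : 0 < k
        · have h0 := ih (acc ++ [(k : Int)]) 0
          simp only [Nat.cast_zero] at h0
          simp [goodSoFarLoop, specS, hq, hk, h0]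
        · have hk0 : k = 0 := by omega
          subst hk0
          have h0 := ih acc 0
          simp only [Nat.cast_zero] at h0
          simp [goodSoFarLoop, specS, hq, h0]
      · by_cases hh : c = '#'
        · subst hh
          have h1 := ih acc (k + 1)
          push_cast at h1
          simp [goodSoFarLoop, specS, hq, h1]
        · have h1 := ih acc k
          simp [goodSoFarLoop, specS, hq, hd, hh, h1]

-- groups extracted from the segment list, with k extra '#'s merged into the head segment
def bgroups : Nat → List (List Char) → List Int
  | _, [] => []
  | _, [_] => []
  | k, seg :: s :: t =>
    (if 0 < k + seg.count '#' then [((k + seg.count '#' : Nat) : Int)] else []) ++ bgroups 0 (s :: t)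

lemma bgroups_head (k k' : Nat) (c : Char) (s : List Char) (t : List (List Char))
    (h : k + (c :: s).count '#' = k' + s.count '#') :
    bgroups k ((c :: s) :: t) = bgroups k' (s :: t) := by
  cases t with
  | nil => simp [bgroups]
  | cons u v => simp [bgroups, h]

lemma specS_eq_bgroups (l : List Char) : ∀ (k : Nat),
    specS k l = bgroups k (List.splitOnP (fun c => c == '.') (l.takeWhile (fun c => !(c == '?')))) := by
  induction l with
  | nil => intro k; simp [specS, List.splitOnP_nil, bgroups]
  | cons c r ih =>
    intro k
    by_cases hq : c = '?'
    · simp [specS, hq, List.takeWhile, List.splitOnP_nil, bgroups]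
    · by_cases hd : c = '.'
      · subst hd
        have htw : List.takeWhile (fun c => !(c == '?')) ('.' :: r)
            = '.' :: List.takeWhile (fun c => !(c == '?')) r := by
          simp [List.takeWhile]
        rw [specS, htw, List.splitOnP_cons]
        simp only [beq_self_eq_true, if_pos]
        obtain ⟨s, t, hst⟩ : ∃ s t, List.splitOnP (fun c => c == '.') (List.takeWhile (fun c => !(c == '?')) r) = s :: t := by
          rcases hsp : List.splitOnP (fun c => c == '.') (List.takeWhile (fun c => !(c == '?')) r) with _ | ⟨s, t⟩
          · exact absurd hsp (List.splitOnP_ne_nil _ _)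
          · exact ⟨s, t, rfl⟩
        rw [hst, bgroups]
        have := ih 0
        rw [hst] at this
        simp [this]
      · have hcq : (c == '?') = false := by simp [hq]
        have htw : List.takeWhile (fun c => !(c == '?')) (c :: r)
            = c :: List.takeWhile (fun c => !(c == '?')) r := by
          simp [List.takeWhile, hcq]
        rw [htw, List.splitOnP_cons]
        have hcd : ((c == '.') = true) = False := by simp [hd]
        simp only [hcd, if_false]
        obtain ⟨s, t, hst⟩ : ∃ s t, List.splitOnP (fun c => c == '.') (List.takeWhile (fun c => !(c == '?')) r) = s :: t := by
          rcases hsp : List.splitOnP (fun c => c == '.') (List.takeWhile (fun c => !(c == '?')) r) with _ | ⟨s, t⟩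
          · exact absurd hsp (List.splitOnP_ne_nil _ _)
          · exact ⟨s, t, rfl⟩
        rw [hst, List.modifyHead_cons]
        by_cases hh : c = '#'
        · subst hh
          rw [specS]
          simp only [if_neg hq, if_neg hd, if_true]
          rw [ih (k+1), hst]
          exact (bgroups_head k (k+1) '#' s t (by simp; omega)).symm
        · rw [specS]
          simp only [if_neg hq, if_neg hd, if_neg hh]
          rw [ih k, hst]
          exact (bgroups_head k k c s t (by simp [hh])).symm

lemma countGo_single (d : Char) : ∀ (fuel : Nat) (l : List Char) (acc : Nat), l.length ≤ fuel →
    PySem.Chars.count.go [d] fuel l acc = acc + l.count d := by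
  intro fuel
  induction fuel with
  | zero =>
    intro l acc h
    have : l = [] := by cases l <;> simp_all
    subst this
    simp [PySem.Chars.count.go]
  | succ f ih =>
    intro l acc h
    cases l with
    | nil => simp [PySem.Chars.count.go]
    | cons c t =>
      rw [PySem.Chars.count.go]
      by_cases hc : c = d
      · subst hc
        have hp : List.isPrefixOf [c] (c :: t) = true := by simp [List.isPrefixOf]
        simp only [hp, if_true, List.length_cons, List.drop_succ_cons, List.length_nil, List.drop_zero]
        rw [ih t (acc+1) (by simpa using h)]
        simp
        omega
      · have hp : List.isPrefixOf [d] (c :: t) = false := by simpa [List.isPrefixOf] using Ne.symm hc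
        simp only [hp, Bool.false_eq_true, if_false]
        rw [ih t acc (by simpa using h)]
        simp [hc]

lemma count_single (d : Char) (l : List Char) : PySem.Chars.count l [d] = l.count d := by
  rw [PySem.Chars.count]
  simp only [List.isEmpty_cons, Bool.false_eq_true, if_false]
  simpa using countGo_single d l.length l 0 le_rfl

lemma splitOnGo_single (d : Char) : ∀ (fuel : Nat) (l cur : List Char) (acc : List (List Char)),
    l.length < fuel →
    PySem.Chars.splitOn.go [d] fuel l cur acc
      = acc.reverse ++ (List.splitOnP (fun c => c == d) l).modifyHead (cur.reverse ++ ·) := by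
  intro fuel
  induction fuel with
  | zero => intro l cur acc h; omega
  | succ f ih =>
    intro l cur acc h
    cases l with
    | nil => simp [PySem.Chars.splitOn.go, List.splitOnP_nil]
    | cons c t =>
      rw [PySem.Chars.splitOn.go]
      by_cases hc : c = d
      · subst hc
        have hp : List.isPrefixOf [c] (c :: t) = true := by simp [List.isPrefixOf]
        simp only [hp, if_true, List.length_cons, List.drop_succ_cons, List.length_nil, List.drop_zero]
        rw [ih t [] (cur.reverse :: acc) (by simpa using h)]
        rcases hsp : List.splitOnP (fun x => x == c) t with _ | ⟨s, u⟩
        · exact absurd hsp (List.splitOnP_ne_nil _ _)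
        · simp [List.splitOnP_cons, hsp]
      · have hp : List.isPrefixOf [d] (c :: t) = false := by simpa [List.isPrefixOf] using Ne.symm hc
        simp only [hp, Bool.false_eq_true, if_false]
        rw [ih t (c :: cur) acc (by simpa using h)]
        rcases hsp : List.splitOnP (fun x => x == d) t with _ | ⟨s, u⟩
        · exact absurd hsp (List.splitOnP_ne_nil _ _)
        · simp [List.splitOnP_cons, hsp, hc]

lemma splitOn_single (d : Char) (l : List Char) :
    PySem.Chars.splitOn l [d] = List.splitOnP (fun c => c == d) l := by
  rw [PySem.Chars.splitOn]
  rw [splitOnGo_single d (l.length + 1) l [] [] (by omega)]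
  rcases hsp : List.splitOnP (fun c => c == d) l with _ | ⟨s, u⟩
  · exact absurd hsp (List.splitOnP_ne_nil _ _)
  · simp

lemma splitOnP_headD (d : Char) (l : List Char) :
    (List.splitOnP (fun c => c == d) l).headD [] = l.takeWhile (fun c => !(c == d)) := by
  induction l with
  | nil => simp [List.splitOnP_nil]
  | cons c t ih =>
    rw [List.splitOnP_cons]
    by_cases hc : c = d
    · subst hc; simp [List.takeWhile]
    · have hcd : (c == d) = false := by simp [hc]
      rcases hsp : List.splitOnP (fun x => x == d) t with _ | ⟨s, u⟩
      · exact absurd hsp (List.splitOnP_ne_nil _ _)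
      · rw [hsp] at ih
        simp [hcd, List.takeWhile]
        simpa using ih

lemma bgroups_zero (segs : List (List Char)) :
    bgroups 0 segs
      = (segs.dropLast.map (fun seg => ((seg.count '#' : Nat) : Int))).filter (fun n => n > 0) := by
  induction segs with
  | nil => simp [bgroups]
  | cons seg rest ih =>
    cases rest with
    | nil => simp [bgroups]
    | cons s t =>
      rw [bgroups, ih]
      by_cases hp : 0 < seg.count '#'
      · simp [List.dropLast_cons_of_ne_nil, hp]
      · have h0 : seg.count '#' = 0 := by omega
        simp [List.dropLast_cons_of_ne_nil, h0]

-- ===== VERDICT (by name: the statement is the Claim_ definition above) =====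
theorem good_so_far_spec : Claim_equal_good_so_far := by
  intro springs lengths _
  unfold Spec_good_so_far good_so_far good_so_far_alt
  have hmain : goodSoFarLoop springs.toList [] 0
      = (((PySem.Chars.splitOn ((PySem.Chars.splitOn springs.toList ['?']).headD []) ['.']).dropLast).map
          (fun seg => (PySem.Chars.count seg ['#'] : Int))).filter (fun n => n > 0) := by
    have h0 := goodSoFarLoop_eq_specS springs.toList [] 0
    simp only [List.nil_append, Nat.cast_zero] at h0
    rw [h0, specS_eq_bgroups, bgroups_zero]
    rw [splitOn_single '?', splitOnP_headD '?', splitOn_single '.']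
    simp only [count_single]
  rw [hmain]
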